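-- pv_equiv track=rewrite | github.com/jramaswami/Binary_Search_Python | furthest_from_origin.py | solve
-- ===== SOURCE A (Python) =====
-- def solve(s):
--     posn = 0
--     qns = 0
--     for c in s:
--         if c == 'L':
--             posn -= 1
--         elif c == 'R':
--             posn += 1
--         elif c == '?':
--             qns += 1
--
--     return abs(posn) + qns
-- ===== SOURCE B (Python) =====
-- def solve(s):
--     def pos(assign):
--         p = 0
--         for c in s:
--             if c == '?':
--                 c = assign
--             if c == 'R':
--                 p += 1
--             elif c == 'L':
--                 p -= 1
--         return p
--     return max(abs(pos('R')), abs(pos('L')))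
-- ===== Notes on version B (the rewrite author's own statement) =====
-- stated objective: alternative
-- what changed: Instead of counting wildcards separately, B evaluates the two extreme wildcard assignments (all '?' as 'R' and all '?' as 'L') and returns the larger of the two resulting distances, which equals |net|+wildcards since max(|p+q|,|p-q|)=|p|+q for q>=0.
import Mathlib
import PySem

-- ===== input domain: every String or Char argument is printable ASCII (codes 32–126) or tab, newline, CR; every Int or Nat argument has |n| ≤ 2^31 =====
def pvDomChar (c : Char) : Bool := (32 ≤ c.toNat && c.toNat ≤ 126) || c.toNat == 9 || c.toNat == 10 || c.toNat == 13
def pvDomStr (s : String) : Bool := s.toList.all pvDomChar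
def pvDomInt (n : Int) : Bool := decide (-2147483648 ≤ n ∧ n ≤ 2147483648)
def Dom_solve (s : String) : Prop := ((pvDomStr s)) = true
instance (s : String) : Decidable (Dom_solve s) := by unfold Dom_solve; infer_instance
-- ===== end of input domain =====

-- B evaluates the two extreme wildcard assignments (all '?'→'R' and all '?'→'L')
-- and returns the larger distance, instead of A's counting loop (alternative algorithm).


-- ===== PORT A =====
-- literal transliteration: one fold over the characters carrying (posn, qns)
def solve (s : String) : Int :=
  let st := s.toList.foldl
    (fun (st : Int × Int) c =>
      if c = 'L' then (st.1 - 1, st.2)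
      else if c = 'R' then (st.1 + 1, st.2)
      else if c = '?' then (st.1, st.2 + 1)
      else st)
    (0, 0)
  |st.1| + st.2

-- ===== PORT B =====
-- Source B's helper pos(assign): a loop that first resolves '?' to the assigned move,
-- then steps the position
def solvePos (s : String) (assign : Char) : Int :=
  s.toList.foldl
    (fun (p : Int) c =>
      let c' := if c = '?' then assign else c
      if c' = 'R' then p + 1
      else if c' = 'L' then p - 1
      else p)
    0

def solve_alt (s : String) : Int :=
  max |solvePos s 'R'| |solvePos s 'L'|

-- ===== PRECONDITION & SPEC =====
def Spec_solve (s : String) (out : Int) : Prop := out = solve_alt s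
instance (s : String) (out : Int) : Decidable (Spec_solve s out) := by unfold Spec_solve; infer_instance

-- ===== CLAIM (what is proved, stated in full; the proofs are below) =====
def Claim_equal_solve : Prop := ∀ (s : String), Dom_solve s → Spec_solve s (solve s)

-- ===== LEMMAS AND PROOFS =====

theorem solve_fold_invariant (l : List Char) (p q : Int) :
    l.foldl
      (fun (st : Int × Int) c =>
        if c = 'L' then (st.1 - 1, st.2)
        else if c = 'R' then (st.1 + 1, st.2)
        else if c = '?' then (st.1, st.2 + 1)
        else st)
      (p, q)
    = (p + (l.count 'R' : Int) - (l.count 'L' : Int), q + (l.count '?' : Int)) := by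
  induction l generalizing p q with
  | nil => simp
  | cons c t ih =>
    by_cases hL : c = 'L'
    · subst hL; simp [ih]; omega
    · by_cases hR : c = 'R'
      · subst hR; simp [ih, hL]; omega
      · by_cases hQ : c = '?'
        · subst hQ; simp [ih, hL, hR]; omega
        · simp [ih, hL, hR, hQ]

theorem posFold_R (l : List Char) (p : Int) :
    l.foldl
      (fun (p : Int) c =>
        let c' := if c = '?' then 'R' else c
        if c' = 'R' then p + 1 else if c' = 'L' then p - 1 else p)
      p
    = p + (l.count 'R' : Int) - (l.count 'L' : Int) + (l.count '?' : Int) := by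
  induction l generalizing p with
  | nil => simp
  | cons c t ih =>
    rw [List.foldl_cons, ih]
    by_cases hQ : c = '?'
    · subst hQ; simp; omega
    · by_cases hR : c = 'R'
      · subst hR; simp; omega
      · by_cases hL : c = 'L'
        · subst hL; simp [hQ]; omega
        · simp [hQ, hR, hL]

theorem posFold_L (l : List Char) (p : Int) :
    l.foldl
      (fun (p : Int) c =>
        let c' := if c = '?' then 'L' else c
        if c' = 'R' then p + 1 else if c' = 'L' then p - 1 else p)
      p
    = p + (l.count 'R' : Int) - (l.count 'L' : Int) - (l.count '?' : Int) := by
  induction l generalizing p with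
  | nil => simp
  | cons c t ih =>
    rw [List.foldl_cons, ih]
    by_cases hQ : c = '?'
    · subst hQ; simp; omega
    · by_cases hR : c = 'R'
      · subst hR; simp; omega
      · by_cases hL : c = 'L'
        · subst hL; simp [hQ]; omega
        · simp [hQ, hR, hL]

theorem abs_add_eq_max (p q : Int) (hq : 0 ≤ q) :
    |p| + q = max |p + q| |p - q| := by
  rw [abs_eq_max_neg, abs_eq_max_neg, abs_eq_max_neg, max_def, max_def, max_def, max_def]
  split_ifs <;> omega

-- ===== VERDICT (by name: the statement is the Claim_ definition above) =====
theorem solve_spec : Claim_equal_solve := by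
  intro s _
  unfold Spec_solve solve solve_alt solvePos
  rw [solve_fold_invariant, posFold_R, posFold_L]
  simp only [zero_add]
  exact abs_add_eq_max _ _ (Int.natCast_nonneg _)
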